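-- pv_equiv track=rewrite | github.com/bisqwit/satisfactory_smartsplit | partition.py | build_dp_sets
-- ===== SOURCE A (Python) =====
-- from typing import List, Optional, Tuple, Generator, Set
--
-- def build_dp_sets(arr: List[int]) -> List[Set[int]]:
--     """
--     dp[i] = set of sums reachable using first i items (indices 0..i-1)
--     """
--     n = len(arr)
--     dp = [set() for _ in range(n + 1)]
--     dp[0].add(0)
--     for i in range(1, n + 1):
--         x = arr[i-1]
--         # copy previous sums
--         dp[i] |= dp[i-1]
--         # add sums formed by including x
--         for s in dp[i-1]:
--             dp[i].add(s + x)
--     return dp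
-- ===== SOURCE B (Python) =====
-- def build_dp_sets(arr):
--     def prefix_sums(prefix):
--         s = {0}
--         for x in prefix:
--             s = s.union(v + x for v in s)
--         return s
--     return [prefix_sums(arr[:i]) for i in range(len(arr) + 1)]
-- ===== Notes on version B (the rewrite author's own statement) =====
-- stated objective: alternative
-- what changed: Replaces the in-place dp table that carries each set forward by index mutation with a stateless comprehension that recomputes each prefix's sum-set independently by folding a set-comprehension step over the slice arr[:i].
import Mathlib
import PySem

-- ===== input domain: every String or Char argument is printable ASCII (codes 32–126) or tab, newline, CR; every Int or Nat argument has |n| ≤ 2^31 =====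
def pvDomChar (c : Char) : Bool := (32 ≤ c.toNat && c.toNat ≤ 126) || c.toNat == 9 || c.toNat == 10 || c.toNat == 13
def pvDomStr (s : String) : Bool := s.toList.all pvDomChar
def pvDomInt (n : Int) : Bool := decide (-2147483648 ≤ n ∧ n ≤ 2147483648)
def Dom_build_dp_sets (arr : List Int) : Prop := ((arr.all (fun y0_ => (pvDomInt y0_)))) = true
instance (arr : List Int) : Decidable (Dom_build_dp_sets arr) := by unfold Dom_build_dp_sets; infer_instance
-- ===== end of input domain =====

-- B replaces A's in-place dp table (each set carried forward by index mutation) with a stateless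
-- comprehension that recomputes every prefix's sum-set independently; objective: alternative (not faster).

-- ===== PORT A =====
-- body of A's 'for i in range(1, n + 1)' loop: dp is the whole table, mutated at index i
def pvBodyA (arr : List Int) (dp : List (PySem.Set Int)) (i : Int) : List (PySem.Set Int) :=
  let x := PySem.List.pyGetD arr (i - 1) 0
  let prev := PySem.List.pyGetD dp (i - 1) PySem.Set.empty
  let cur := PySem.Set.union (PySem.List.pyGetD dp i PySem.Set.empty) prev   -- dp[i] |= dp[i-1]
  let cur := prev.foldl (fun c s => PySem.Set.add c (s + x)) cur             -- for s in dp[i-1]: dp[i].add(s+x)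
  PySem.List.pySetD dp i cur

def build_dp_sets (arr : List Int) : List (List Int) :=
  let n := arr.length
  let dp : List (PySem.Set Int) := List.replicate (n + 1) PySem.Set.empty
  let dp := PySem.List.pySetD dp 0
    (PySem.Set.add (PySem.List.pyGetD dp 0 PySem.Set.empty) 0)               -- dp[0].add(0)
  (PySem.List.pyRange 1 ((n : Int) + 1)).foldl (pvBodyA arr) dp

-- ===== PORT B =====
-- helper prefix_sums of Source B: fold 's = s.union(v + x for v in s)' over the prefix
def pvPrefixSums (pre : List Int) : PySem.Set Int :=
  pre.foldl (fun s x => PySem.Set.union s (s.map (fun v => v + x))) (PySem.Set.ofList [0])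

def build_dp_sets_alt (arr : List Int) : List (List Int) :=
  (PySem.List.pyRange 0 ((arr.length : Int) + 1)).map
    (fun i => pvPrefixSums (PySem.List.slice arr none (some i)))

-- ===== PRECONDITION & SPEC =====
def Spec_build_dp_sets (arr : List Int) (out : List (List Int)) : Prop := out = build_dp_sets_alt arr
instance (arr : List Int) (out : List (List Int)) : Decidable (Spec_build_dp_sets arr out) := by unfold Spec_build_dp_sets; infer_instance

-- ===== CLAIM (what is proved, stated in full; the proofs are below) =====
def Claim_equal_build_dp_sets : Prop := ∀ (arr : List Int), Dom_build_dp_sets arr → Spec_build_dp_sets arr (build_dp_sets arr)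

-- ===== LEMMAS AND PROOFS =====

theorem pvNodup_foldl_step (l : List Int) : ∀ s : PySem.Set Int, s.Nodup →
    (l.foldl (fun s x => PySem.Set.union s (s.map (fun v => v + x))) s).Nodup := by
  induction l with
  | nil => intro s hs; simpa using hs
  | cons a t ih =>
      intro s hs
      exact ih _ (PySem.Set.nodup_update _ _ hs)

theorem pvNodup_prefixSums (p : List Int) : (pvPrefixSums p).Nodup :=
  pvNodup_foldl_step p _ (PySem.Set.nodup_ofList [0])

-- A's inner loop over prev equals B's 's.union(v + x for v in s)' step
theorem pvStep_eq (s : PySem.Set Int) (x : Int) :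
    s.foldl (fun c v => PySem.Set.add c (v + x)) s
      = PySem.Set.union s (s.map (fun v => v + x)) := by
  show _ = (s.map (fun v => v + x)).foldl PySem.Set.add s
  rw [List.foldl_map]

theorem pvPrefixSums_succ (arr : List Int) (k : Nat) (h : k < arr.length) :
    pvPrefixSums (arr.take (k + 1))
      = PySem.Set.union (pvPrefixSums (arr.take k))
          ((pvPrefixSums (arr.take k)).map (fun v => v + arr[k])) := by
  unfold pvPrefixSums
  rw [List.take_add_one, List.getElem?_eq_getElem h, Option.toList_some, List.foldl_append,
    List.foldl_cons, List.foldl_nil]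

theorem pvSet_append {a : Type} (l1 : List a) (x : a) (l2 : List a) (c : a) (n : Nat)
    (h : l1.length = n) : (l1 ++ x :: l2).set n c = l1 ++ c :: l2 := by
  subst h
  induction l1 with
  | nil => rfl
  | cons b t ih =>
      show b :: (t ++ x :: l2).set t.length c = b :: (t ++ c :: l2)
      rw [ih]

theorem pvLoopA_inv (arr : List Int) (k : Nat) (hk : k ≤ arr.length) :
    (PySem.List.pyRange 1 ((k : Int) + 1)).foldl (pvBodyA arr)
        (([0] : PySem.Set Int) :: List.replicate arr.length PySem.Set.empty)
      = (List.range (k + 1)).map (fun j => pvPrefixSums (arr.take j))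
          ++ List.replicate (arr.length - k) PySem.Set.empty := by
  induction k with
  | zero =>
      simp [PySem.List.pyRange, pvPrefixSums]
      rfl
  | succ k ih =>
      have hk' : k ≤ arr.length := Nat.le_of_succ_le hk
      have hlt : k < arr.length := hk
      have hcast : ((k + 1 : Nat) : Int) + 1 = ((k : Int) + 1) + 1 := by push_cast; ring
      have hlen : ((List.range (k + 1)).map (fun j => pvPrefixSums (List.take j arr))).length
          = k + 1 := by simp
      have hx : PySem.List.pyGetD arr (((k : Int) + 1) - 1) 0 = arr[k] := by
        rw [add_sub_cancel_right, PySem.List.pyGetD_natCast, List.getD_eq_getElem?_getD,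
          List.getElem?_eq_getElem hlt]
        rfl
      have hprev : PySem.List.pyGetD
          (((List.range (k + 1)).map (fun j => pvPrefixSums (List.take j arr)))
            ++ List.replicate (arr.length - k) PySem.Set.empty)
          (((k : Int) + 1) - 1) PySem.Set.empty = pvPrefixSums (List.take k arr) := by
        rw [add_sub_cancel_right, PySem.List.pyGetD_natCast, List.getD_eq_getElem?_getD,
          List.getElem?_append_left (by simp), List.getElem?_map,
          List.getElem?_range (Nat.lt_succ_self k)]
        rfl
      have hrep : List.replicate (arr.length - k) (PySem.Set.empty : PySem.Set Int)
          = PySem.Set.empty :: List.replicate (arr.length - (k + 1)) PySem.Set.empty := by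
        rw [show arr.length - k = (arr.length - (k + 1)) + 1 by omega, List.replicate_succ]
      have hcur : PySem.List.pyGetD
          (((List.range (k + 1)).map (fun j => pvPrefixSums (List.take j arr)))
            ++ List.replicate (arr.length - k) PySem.Set.empty)
          ((k : Int) + 1) PySem.Set.empty = PySem.Set.empty := by
        rw [show ((k : Int) + 1) = ((k + 1 : Nat) : Int) by push_cast; ring,
          PySem.List.pyGetD_natCast, List.getD_eq_getElem?_getD,
          List.getElem?_append_right (by simp), hlen, Nat.sub_self, hrep]
        rfl
      rw [hcast, PySem.List.pyRange_one_succ_right (by omega), List.foldl_append, ih hk',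
        List.foldl_cons, List.foldl_nil]
      simp only [pvBodyA]
      rw [hx, hprev, hcur]
      have hnd : (pvPrefixSums (List.take k arr)).Nodup := pvNodup_prefixSums _
      have hunion : PySem.Set.union (PySem.Set.empty : PySem.Set Int)
          (pvPrefixSums (List.take k arr)) = pvPrefixSums (List.take k arr) :=
        PySem.Set.ofList_eq_self_of_nodup _ hnd
      rw [hunion, pvStep_eq _ _, ← pvPrefixSums_succ arr k hlt]
      rw [show ((k : Int) + 1) = ((k + 1 : Nat) : Int) by push_cast; ring,
        PySem.List.pySetD_natCast, hrep, pvSet_append _ _ _ _ _ hlen]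
      rw [List.range_succ (n := k + 1), List.map_append]
      simp

theorem pvAlt_eq_map (arr : List Int) :
    build_dp_sets_alt arr
      = (List.range (arr.length + 1)).map (fun j => pvPrefixSums (arr.take j)) := by
  unfold build_dp_sets_alt
  rw [show ((arr.length : Int) + 1) = ((arr.length + 1 : Nat) : Int) by push_cast; ring,
    PySem.List.pyRange_zero_natCast, List.map_map]
  refine List.map_congr_left (fun j _ => ?_)
  simp [PySem.List.slice_to_natCast]

-- ===== VERDICT (by name: the statement is the Claim_ definition above) =====
theorem build_dp_sets_spec : Claim_equal_build_dp_sets := by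
  intro arr _
  unfold Spec_build_dp_sets
  simp only [build_dp_sets]
  have hdp0 : PySem.List.pySetD (List.replicate (arr.length + 1) (PySem.Set.empty : PySem.Set Int)) 0
      (PySem.Set.add (PySem.List.pyGetD (List.replicate (arr.length + 1) (PySem.Set.empty : PySem.Set Int)) 0 PySem.Set.empty) 0)
      = (([0] : PySem.Set Int) :: List.replicate arr.length PySem.Set.empty) := by
    rw [show (0 : Int) = ((0 : Nat) : Int) from rfl, PySem.List.pySetD_natCast,
      PySem.List.pyGetD_natCast, List.replicate_succ]
    rfl
  rw [hdp0, pvLoopA_inv arr arr.length le_rfl, Nat.sub_self, pvAlt_eq_map]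
  simp
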